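/-
  THE SEGMENTS OF `gif_decode` (gif_driver.c:179-227; 149 instructions at 10AD80H; a PROTECTED frame: `error` (4 bytes at base + 48)
  and THE CURSOR (16 bytes at base + 64); base = RA − 136; contract: Gif/Spec/Driver.lean `gif_decode.spec`;
  design/units/gif_decode.tsv). THIS IS WHERE THE READER IS MADE.

      unit  from      to (exits)               what it walks
      P     10AD80H   10ADDAH                  five pushes, `sub rsp, 96`, `r13 = in`, `rbp = n`, `rbx = report`, the frame's header, the
                                               shadow index in `r12`, the three poison stores                           (17 instructions)
      1     10ADDAH   10AEB3H                  `error = 0` (l.183, the own frame's object); THE THIRTEEN CHECKED STORES into `*report`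
                                               (l.185-197: ten of 4 bytes at `report + 0 … 36`, three of 8 bytes at `+ 40, 48, 56`)   (40)
      2     10AEB3H   10AEDDH | 10AFDBH        THE CURSOR IS BUILT (l.199-200: `cursor.cur = in`, `cursor.end = in + n`: two unchecked
                                               stores into the own frame's object); `DGifOpen(&cursor, mem_read, &error)` (l.202); NULL
                                               (10B000H, l.204-205): the checked stores `report->open_error = error`,
                                               `report->consumed = cursor.cur − in`, to the epilogue                                  (19)
      3     10AEDDH   10AF77H                  `rbp = gif`; `DGifSlurp(gif)` (l.209); the checked stores `report->slurp_result`,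
                                               `report->exit_code` (either arm, l.210-214); the checked 4-byte loads of `gif->Error`,
                                               `ImageCount`, `SWidth`, `SHeight`, each stored (checked) into `*report` (l.215-218)     (40)
      4     10AF77H   10AF93H                  `digest_file(gif, &report->pixels)` (l.220), the checked store `report->digest`        (7)
      5     10AF93H   10AFDBH                  `error = 0` (l.223); `DGifCloseFile(gif, &error)` (l.224); the checked stores
                                               `report->close_result`, `report->close_error = error`, `report->consumed` (l.224-226)  (17)
      E     10AFDBH   ret                      the two stores that clear the frame's shadow, `add rsp, 96`, five pops, `ret`          (9)
      COMPOSITION                              `compose`, proved below: `ReachVia.trans` along the segments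

  THE READER: the ghost `reader e = ⟨RA − 72, in, n⟩` — the cursor object of THIS frame, the input of the pre. Its context
  `Ctx rest (framesIn frames e) (reader e)` is memory-independent and PROVED here from the pre (`ctx`): the cursor is an object of the
  own protected frame, the input clause and the four globals are the pre's. `CursorOK (reader e)` holds after the two cursor stores:
  `cur = in`, `end = in + n` AS NUMBERS — the word addition does not wrap: for `n = 0` it is `in`; otherwise the input lies inside one
  live object, below C00000H (`LiveIn.inside`). The pre is strong enough: NO finding here.
  THE REPORT is 64 bytes of a stack object of a CALLER's frame: at or above the return-address slot (`report_above`), so a store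
  into it meets neither this function's stack nor its cursor; live under every heap and with the own frame pushed (`reportLive`).
  THE GHOSTS THAT CHANGE: the heap `Hc` (`SameRegion H Hc`) and, from the return of DGifOpen on, the forest `Fc` are parameters of the
  assertions; `Fc.Complete` holds from DGifOpen on (`Fc.saved = none`) and is re-established by DGifSlurp's post.
-/
import Gif.Spec.Driver
import Gif.Spec.Desc
import Gif.Spec.Slurp
import Gif.LabelsAt
namespace Gif.Spec
open X86 X86.User Asan ProgX.Base ProgX.Base.Spec

namespace gif_decode

/-- The active frames inside the body: the function's own protected frame (`base = RA − 136`), innermost. -/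
abbrev framesIn (frames : List (Nat × FrameLayout)) (e : State) : List (Nat × FrameLayout) :=
  ((e.reg .rsp).toNat - 136, Gif.Frames.gif_decode) :: frames

/-- **THE READER gif_decode MAKES**, as a ghost: the cursor is the own frame's object at base + 64 = RA − 72; the input is the one the
arguments name. -/
abbrev reader (e : State) : Rd :=
  ⟨(e.reg .rsp).toNat - 72, (e.reg .rdi).toNat, (e.reg .rsi).toNat⟩

/-! ### Three facts the segments' proofs need, once -/

/-- **THE CONTEXT OF EVERY FUNCTION BELOW** (`Ctx`, memory-independent), from the pre: the cursor `⟨RA − 72, 16, .stack⟩` is the second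
object of the own protected frame (`Gif.Frames.gif_decode`, `FrameLayout.objsAt`, `stackObjs_cons`); the input clause and the four
registered globals are the pre's. (`hroom`: from `AtEntry.room`, the stack region starts at 700000H.) -/
theorem ctx {H : Heap} {rest : List Obj} {frames : List (Nat × FrameLayout)} {e : State}
    (hp : (gif_decode.spec H rest frames).pre e) (hroom : 136 ≤ (e.reg .rsp).toNat) :
    Ctx rest (framesIn frames e) (reader e) := by
  obtain ⟨_, hglob, _, hin, _, _, _⟩ := hp
  refine ⟨?_, hin, hglob.masks, hglob.offs, hglob.jumps, hglob.stamp⟩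
  rw [stackObjs_cons]
  apply List.mem_append_left
  unfold FrameLayout.objsAt
  apply List.mem_map.mpr
  refine ⟨⟨"cursor", 64, 16⟩, ?_, ?_⟩
  · unfold Gif.Frames.gif_decode
    exact List.mem_cons_of_mem _ List.mem_cons_self
  · simp only [Obj.mk.injEq, and_true]
    omega

/-- **The report lies at or above the return-address slot**: it is a live range in the stack region (the pre), so inside a stack
object of an ACTIVE frame of the callers (`LiveIn.above`), all of which lie at or above the clean stack's end `rsp + 8`. A store into
`[report, report + 64)` meets neither this function's 136 bytes below the return address (the cursor, `error`, the saved registers)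
nor its callees' stack. -/
theorem report_above {H : Heap} {rest : List Obj} {frames : List (Nat × FrameLayout)} {e : State}
    (hp : (gif_decode.spec H rest frames).pre e) : (e.reg .rsp).toNat + 8 ≤ (e.reg .rdx).toNat := by
  obtain ⟨hheap, _, _, _, hrep, hlo, hhi⟩ := hp
  have h := hrep.above hheap.inv.shadow
  omega

/-- **The report is live under every heap and with one more frame pushed**: it lies in the stack region, so the object of the pre's
`LiveIn` is a stack object of the callers' frames (a heap object lies at or above 800000H, an object of `rest` off the stack). What
every check `__asan_store4 / store8_noabort` of a store into `*report` asks, whatever the heap is by then. -/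
theorem reportLive {H : Heap} {rest : List Obj} {frames : List (Nat × FrameLayout)} {e : State}
    (hp : (gif_decode.spec H rest frames).pre e) (H' : Heap) (bF : Nat × FrameLayout) (a n : Nat)
    (h1 : (e.reg .rdx).toNat ≤ a) (h2 : a + n ≤ (e.reg .rdx).toNat + 64) :
    LiveIn (H'.liveObjs ++ rest) (bF :: frames) a n := by
  obtain ⟨hheap, _, _, _, hrep, hlo, hhi⟩ := hp
  have hinv := hheap.inv
  obtain ⟨o, ho, k1, k2⟩ := hrep
  rcases List.mem_append.mp ho with hs | hoth
  · refine ⟨o, List.mem_append_left _ ?_, ?_, ?_⟩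
    · rw [stackObjs_cons]
      exact List.mem_append_right _ hs
    · omega
    · omega
  · exfalso
    rcases List.mem_append.mp hoth with hheapobj | hr
    · obtain ⟨⟨c, hlive⟩, _⟩ := Heap.live_of_mem_liveObjs hheapobj
      have g1 := hinv.heap.obj_range hlive
      have g2 := hinv.heap.offStack
      have g3 := hinv.heap.room
      have g4 := hinv.heap.size_le_cap hlive
      simp only at g1 g4
      omega
    · have hoff := hinv.shadow.off o (List.mem_append_right _ hr)
      unfold OffStack at hoff
      omega

/-! ### The assertions -/

/-- **WHAT EVERY CUT OF THE BODY SHARES** (nothing of it mentions the heap): the state `v` stands at the address `cut`, inside the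
call that was entered at the state `e` (return address `ret`) with the function's precondition. The prologue is done: five registers
saved (`r14 r13 r12 rbp rbx` in push order), `rsp = RA − 136`, `r12` = the shadow index of the frame (`(RA − 136) >> 3`: the epilogue's
stores address `[r12 + C00000H]`), `r13 = in` (last use 10AFCBH / 10B015H: `cursor.cur − in`), `rbx = report`, `r15` never touched;
the image's constants are in memory (the post's clause; DGifOpen's pre); nothing was written but the function's stack, the frame's 12
shadow bytes and the contract's windows (the heap's region and its shadow, the report). The frame's objects: `error` at `rsp + 0x30` =
RA − 88, the cursor at `rsp + 0x40` = RA − 72. `rbp` and `r14` are locals: what they hold is said by the assertion of each cut. -/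
structure Core (cut : Word) (H : Heap) (rest : List Obj) (frames : List (Nat × FrameLayout)) (u₀ e : State)
    (ret : Word) (v : State) : Prop where
  /-- the function was entered at `e` … -/
  entry : AtEntry (conv u₀) Gif.L.gif_decode.entry (gif_decode.spec H rest frames).frame ret e
  /-- … with its precondition -/
  pre : (gif_decode.spec H rest frames).pre e
  rip : v.rip = cut
  /-- five pushes and `sub rsp, 96` below the return address -/
  rsp : v.reg .rsp = e.reg .rsp - 136
  /-- `mov r12, rsp ; shr r12, 3` (10AD95H, 10ADB2H): the shadow index of the frame -/
  r12 : v.reg .r12 = (e.reg .rsp - 136) >>> 3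
  /-- `mov r13, rdi` (10AD8CH): `in` -/
  r13 : v.reg .r13 = e.reg .rdi
  /-- `mov rbx, rdx` (10AD92H): `report` -/
  rbx : v.reg .rbx = e.reg .rdx
  /-- not used by the function -/
  r15 : v.reg .r15 = e.reg .r15
  /-- the saved registers, in push order: the five pops at 10AFF7H … 10AFFDH (segment E) read them -/
  slot_r14 : v.mem.readLE (e.reg .rsp - 8) 8 = (e.reg .r14).toNat
  slot_r13 : v.mem.readLE (e.reg .rsp - 16) 8 = (e.reg .r13).toNat
  slot_r12 : v.mem.readLE (e.reg .rsp - 24) 8 = (e.reg .r12).toNat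
  slot_rbp : v.mem.readLE (e.reg .rsp - 32) 8 = (e.reg .rbp).toNat
  slot_rbx : v.mem.readLE (e.reg .rsp - 40) 8 = (e.reg .rbx).toNat
  /-- the return address is still in its slot: the `ret` at 10AFFFH (segment E) pops it. No store of the body meets it: the report lies
  above it (`report_above`), the heap's region at 800000H and above, the callees' stack and the frame's objects below it -/
  slot_ra : UInt64.ofNat (v.mem.readLE (e.reg .rsp) 8) = ret
  /-- the image's constants (no window written meets 141300H … 14139AH) -/
  consts : Consts v.mem
  /-- the footprint so far: the function's stack (`frame = 992`), the shadow of the own frame (`[RA − 136, RA − 40)`), the contract's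
  two windows -/
  same : Mem.SameExcept
    [⟨(e.reg .rsp).toNat - 992, (e.reg .rsp).toNat⟩,
     shadowSpan ((e.reg .rsp).toNat - 136) ((e.reg .rsp).toNat - 40),
     ⟨0x800000, 0x1000020⟩,
     ⟨(e.reg .rdx).toNat, (e.reg .rdx).toNat + 64⟩] e.mem v.mem
  code : (conv u₀).code.In v.mem
  abi : (conv u₀).inv v

/-- **AFTER THE PROLOGUE** (10ADDAH `mov DWORD PTR [rsp+0x30], 0`): `Core`; `rbp = n`; `rdx` STILL holds `report` (10ADE2H
`mov rdi, rdx` reads it); the heap is the entry's, with the OWN frame pushed (`HeapInv.prologue_ra`). -/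
structure Body (H : Heap) (rest : List Obj) (frames : List (Nat × FrameLayout)) (u₀ e : State)
    (ret : Word) (v : State) : Prop where
  core : Core Gif.L.gif_decode.at_10adda H rest frames u₀ e ret v
  /-- `mov rbp, rsi` (10AD8FH): `n` -/
  rbp : v.reg .rbp = e.reg .rsi
  /-- the third argument register, untouched by the prologue -/
  rdx : v.reg .rdx = e.reg .rdx
  /-- the heap's invariant for the entry's heap, the own frame active, the clean stack ending at the present stack pointer -/
  inv : HeapInv H rest (framesIn frames e) ((e.reg .rsp).toNat - 136) v.mem

/-- **THE REPORT IS FILLED WITH ITS DEFAULTS** (10AEB3H `mov QWORD PTR [rsp+0x40], r13`, before the cursor is built): `Core`;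
`rbp = n`; the heap is the entry's, the own frame active. (What the report holds is never asked.) -/
structure Filled (H : Heap) (rest : List Obj) (frames : List (Nat × FrameLayout)) (u₀ e : State)
    (ret : Word) (v : State) : Prop where
  core : Core Gif.L.gif_decode.at_10aeb3 H rest frames u₀ e ret v
  /-- `n`: added to `in` at 10AEB8H -/
  rbp : v.reg .rbp = e.reg .rsi
  /-- the heap's invariant for the entry's heap, the own frame active -/
  inv : HeapInv H rest (framesIn frames e) ((e.reg .rsp).toNat - 136) v.mem

/-- **THE DECODER IS OPEN**: `Core`; the present heap `Hc` is at the place of `H`, its invariant holds with the own frame active; THE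
STATE INVARIANT holds for `Hc`, the present forest `Fc` and THE READER OF THIS FRAME — so the callees' `Env Hc rest (framesIn frames
e) Fc (reader e) s` is `inv` (lowered), `core.pre`'s `HeapPre` (base, limit, text), `ctx`, and `ok`; the cursor (`CursorOK`) is in
`ok.shape` —; every counted image is complete (after DGifOpen: there is none; after DGifSlurp: its post). -/
structure Open (cut : Word) (H : Heap) (rest : List Obj) (frames : List (Nat × FrameLayout)) (Hc : Heap) (Fc : Forest)
    (u₀ e : State) (ret : Word) (v : State) : Prop where
  core : Core cut H rest frames u₀ e ret v
  /-- the present heap is at the place of the entry's; its invariant, the own frame active -/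
  region : SameRegion H Hc
  inv : HeapInv Hc rest (framesIn frames e) ((e.reg .rsp).toNat - 136) v.mem
  /-- THE STATE INVARIANT, for the reader this function made -/
  ok : GifOK Hc Fc (reader e) v.mem
  /-- what DGifSlurp's pre and digest_file's pre ask -/
  complete : Fc.Complete

/-- **BEHIND A SUCCESSFUL DGifOpen** (10AEDDH `mov rbp, rax`, behind `test rax, rax ; je`): `Open`, and `rax = gif`. -/
structure AfterOpen (H : Heap) (rest : List Obj) (frames : List (Nat × FrameLayout)) (Hc : Heap) (Fc : Forest)
    (u₀ e : State) (ret : Word) (v : State) : Prop where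
  open_ : Open Gif.L.gif_decode.at_10aedd H rest frames Hc Fc u₀ e ret v
  /-- the result of DGifOpen -/
  rax : (v.reg .rax).toNat = Fc.gif

/-- **BEHIND DGifSlurp AND THE REPORT STORES THAT READ gif** (10AF77H `lea rsi, [rbx+0x28]`, before digest_file), and **BEHIND THE
DIGEST** (10AF93H `mov DWORD PTR [rsp+0x30], 0`, before DGifCloseFile): `Open`, and `rbp = gif`. -/
structure Held (cut : Word) (H : Heap) (rest : List Obj) (frames : List (Nat × FrameLayout)) (Hc : Heap) (Fc : Forest)
    (u₀ e : State) (ret : Word) (v : State) : Prop where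
  open_ : Open cut H rest frames Hc Fc u₀ e ret v
  /-- `mov rbp, rax` (10AEDDH): `gif` -/
  rbp : (v.reg .rbp).toNat = Fc.gif

/-- **BEFORE THE EPILOGUE** (10AFDBH): `Core`, and the contract's postcondition stated of the present memory, for the heap `Hc`: at
the place of `H`, the heap's invariant (own frame still active); the constants are `core.consts`. (The epilogue clears 12 shadow bytes
and pops: `HeapInv.epilogue_ra`, `Consts.sameExcept`.) -/
structure Done (H : Heap) (rest : List Obj) (frames : List (Nat × FrameLayout)) (Hc : Heap) (u₀ e : State)
    (ret : Word) (v : State) : Prop where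
  core : Core Gif.L.gif_decode.at_10afdb H rest frames u₀ e ret v
  /-- the final heap is at the place of the entry's; its invariant, the own frame still active -/
  region : SameRegion H Hc
  inv : HeapInv Hc rest (framesIn frames e) ((e.reg .rsp).toNat - 136) v.mem

/-! ### The segment claims -/

/-- **Segment P** (the prologue, 10AD80H … 10ADDAH, 17 instructions): five pushes, `sub rsp, 96`, `r13 = rdi`, `rbp = rsi`,
`rbx = rdx`, the frame's three header words, the shadow index in `r12`, the three poison stores (`HeapInv.prologue_ra` with
`Gif.Frames.gif_decode_ok`; the constants lie off the stack and off the shadow: `Consts.sameExcept`). -/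
def SegP (Lay : Layout) (μ : Microarch) (u₀ : State) : Prop :=
  ∀ (H : Heap) (rest : List Obj) (frames : List (Nat × FrameLayout)) (e : State) (ret : Word),
    AtEntry (conv u₀) Gif.L.gif_decode.entry (gif_decode.spec H rest frames).frame ret e →
    (gif_decode.spec H rest frames).pre e →
    ReachVia Lay μ WayInv e (Body H rest frames u₀ e ret)

/-- **Segment 1** (10ADDAH … 10AEB3H, l.183-197, 40 instructions): the unchecked store `error = 0` (`[rsp+0x30]`: the own frame's
object, the function's stack); then thirteen times `lea rdi, [rbx+k] ; call __asan_store{4,8}_noabort ; mov [rbx+k], imm`: `k = 0, 4,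
… 36` (4 bytes), `40, 48, 56` (8 bytes). Every check: `reportLive` (for the heap `H`, the own frame pushed). Every store: a window of
the contract's `[report, report + 64)`, in the stack region at or above the return-address slot (`report_above`): no shadow byte, off
the heap's region (`HeapInv.sameExcept` with `HeapWin.offHeap`), off the constants. -/
def Seg1 (Lay : Layout) (μ : Microarch) (u₀ : State) : Prop :=
  ∀ (H : Heap) (rest : List Obj) (frames : List (Nat × FrameLayout)) (e : State) (ret : Word) (v : State),
    Body H rest frames u₀ e ret v →
    ReachVia Lay μ WayInv v (Filled H rest frames u₀ e ret)

/-- **Segment 2** (10AEB3H … 10AEDDH, 10B000H … 10B027H; l.199-206; 19 instructions): **THE READER IS MADE.** The two unchecked stores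
`[rsp+0x40] = r13` (`cursor.cur = in`) and `[rsp+0x48] = rbp + r13` (`cursor.end = in + n`): `CursorOK (reader e)` — `inB ≤ cur = inB`,
`cur ≤ end`, `end = inB + inN` as numbers: the pre says `n = 0` (then `in + 0 = in`) or `LiveIn rest [] in n` (then `in + n ≤ C00000H`
by `LiveIn.inside`: no wrap). `rdx = &error` (`rsp + 0x30`), `esi = 105C60H` (`memReadEntry`), `rdi = &cursor` (`rsp + 0x40`);
`DGifOpen`'s contract for `H`, `rest`, `framesIn frames e`, `reader e`: `HeapPre` from `inv`; `Ctx`: `ctx`; `Consts`: `core.consts`;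
`ErrPtr`: the own frame's object `error` (`⟨RA − 88, 4, .stack⟩ ∈ stackObjs (framesIn frames e)`), 12 bytes below the cursor. Its post
gives A heap `H'` with its invariant, the constants, and NULL or a forest.
  NULL (10B000H): `ebp = error`, the checked store `report->open_error` (`report + 4`), `rbp = cursor.cur − in`, the checked store
  `report->consumed` (`report + 48`), `jmp` to the epilogue with the heap `H'`.
  Otherwise: to 10AEDDH with `H'`, `F'`, `rax = F'.gif`; `F'.Complete` holds trivially (`F'.saved = none`). -/
def Seg2 (Lay : Layout) (μ : Microarch) (u₀ : State) : Prop :=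
  ∀ (H : Heap) (rest : List Obj) (frames : List (Nat × FrameLayout)) (e : State) (ret : Word) (v : State),
    Filled H rest frames u₀ e ret v →
    ReachVia Lay μ WayInv v (fun w =>
      (∃ (Hc : Heap) (Fc : Forest), AfterOpen H rest frames Hc Fc u₀ e ret w) ∨
      (∃ (Hc : Heap), Done H rest frames Hc u₀ e ret w))

/-- **Segment 3** (10AEDDH … 10AF77H, 10B027H … 10B03AH; l.209-218; 40 instructions): `rbp = gif`; `DGifSlurp(gif)` (pre: `Env` — see
`Open` —, `rdi = Fc.gif`, `Fc.Complete`; post: A heap `H'`, A forest `F'` with `Back2`, `F'.gif = Fc.gif`, `F'.Complete`); `r14d = eax`,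
the checked store `report->slurp_result` (`report + 8`); `cmp r14d, 1`: either arm one checked store of `report->exit_code`
(`report + 0`; 10AF02H or 10B027H); then four times a checked 4-byte load inside gif — `gif + 96` (Error), `gif + 32` (ImageCount),
`gif + 0` (SWidth), `gif + 4` (SHeight): `LiveIn` from `ok.owns`, the object `(F'.gif, 120)` — and the checked store of the value to
`report + 12, 24, 28, 32`. Every report store keeps the state invariant: the window lies in the stack region at or above the
return-address slot (`report_above`): off the heap, off the cursor (RA − 72), off the constants: `Loose.offHeap`,
`GifOK.sameExcept`. -/
def Seg3 (Lay : Layout) (μ : Microarch) (u₀ : State) : Prop :=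
  ∀ (H : Heap) (rest : List Obj) (frames : List (Nat × FrameLayout)) (Hc : Heap) (Fc : Forest) (e : State) (ret : Word) (v : State),
    AfterOpen H rest frames Hc Fc u₀ e ret v →
    ReachVia Lay μ WayInv v (fun w =>
      ∃ (H' : Heap) (F' : Forest), Held Gif.L.gif_decode.at_10af77 H rest frames H' F' u₀ e ret w)

/-- **Segment 4** (10AF77H … 10AF93H, l.220, 7 instructions): `rsi = report + 40` (`&report->pixels`), `rdi = gif`; `digest_file`'s
contract for `Hc`, `rest`, `framesIn frames e`, `Fc`, `reader e`: `Env` (`HeapPre` from `inv`, `GifOK`), `Fc.Complete`, the 8 bytes live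
(`reportLive`) in the stack region (the pre's bounds); the `Ctx` of its `Env`: `ctx`. Its footprint:
224 bytes of stack below the own frame (`Loose.stack`: below the cursor) and `[report + 40, report + 48)` (`Loose.offHeap`); its post:
no shadow byte: `HeapInv.sameExcept`, `GifOK.sameExcept`. `r14 = rax`, the checked 8-byte store `report->digest` (`report + 56`).
The heap and the forest do not change. -/
def Seg4 (Lay : Layout) (μ : Microarch) (u₀ : State) : Prop :=
  ∀ (H : Heap) (rest : List Obj) (frames : List (Nat × FrameLayout)) (Hc : Heap) (Fc : Forest) (e : State) (ret : Word) (v : State),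
    Held Gif.L.gif_decode.at_10af77 H rest frames Hc Fc u₀ e ret v →
    ReachVia Lay μ WayInv v (Held Gif.L.gif_decode.at_10af93 H rest frames Hc Fc u₀ e ret)

/-- **Segment 5** (10AF93H … 10AFDBH, l.223-226, 17 instructions): the unchecked store `error = 0` (`[rsp+0x30]`: below the cursor,
the function's stack: the state invariant is kept); `rsi = &error`, `rdi = gif`; `DGifCloseFile`'s contract for `Hc`, `Fc`,
`reader e`: `Env`, `rdi = Fc.gif`, `ErrPtr` (the own frame's object `error`, as in segment 2). Its post: A heap `H'` at the place of
`Hc` with its invariant; the constants: its footprint (stack, the heap's region and shadow, `error`) misses them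
(`Consts.sameExcept`). `ebp = eax`, the checked store `report->close_result` (`report + 16`); `ebp = error`, the checked store
`report->close_error` (`report + 20`); `rbp = cursor.cur − in`, the checked store `report->consumed` (`report + 48`): `reportLive` for
the heap `H'`. To the epilogue with `H'`. NO forest from here on: every object of it is freed. -/
def Seg5 (Lay : Layout) (μ : Microarch) (u₀ : State) : Prop :=
  ∀ (H : Heap) (rest : List Obj) (frames : List (Nat × FrameLayout)) (Hc : Heap) (Fc : Forest) (e : State) (ret : Word) (v : State),
    Held Gif.L.gif_decode.at_10af93 H rest frames Hc Fc u₀ e ret v →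
    ReachVia Lay μ WayInv v (fun w => ∃ (H' : Heap), Done H rest frames H' u₀ e ret w)

/-- **Segment E** (the epilogue, 10AFDBH … 10B000H, 9 instructions): the 8-byte and the 4-byte store that clear the frame's 12 shadow
bytes, `add rsp, 96`, five pops, `ret`. The contract's post from `Done`: `region`, `inv` through `HeapInv.epilogue_ra`, `core.consts`
through the shadow stores. `Returned.same`: `core.same` (the own frame's shadow lies inside `[800000H, 1000020H)`). -/
def SegE (Lay : Layout) (μ : Microarch) (u₀ : State) : Prop :=
  ∀ (H : Heap) (rest : List Obj) (frames : List (Nat × FrameLayout)) (Hc : Heap) (e : State) (ret : Word) (v : State),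
    Done H rest frames Hc u₀ e ret v →
    ReachVia Lay μ WayInv v (Returned (conv u₀) (gif_decode.spec H rest frames) e ret)

/-- **The composition of `gif_decode`**: the seven segments chain into the function's contract. -/
theorem compose {Lay : Layout} {μ : Microarch} {u₀ : State} (hP : SegP Lay μ u₀) (h1 : Seg1 Lay μ u₀) (h2 : Seg2 Lay μ u₀)
    (h3 : Seg3 Lay μ u₀) (h4 : Seg4 Lay μ u₀) (h5 : Seg5 Lay μ u₀) (hE : SegE Lay μ u₀) :
    ∀ (H : Heap) (rest : List Obj) (frames : List (Nat × FrameLayout)),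
      Calls Lay μ WayInv (conv u₀) Gif.L.gif_decode.entry (gif_decode.spec H rest frames) := by
  intro H rest frames e ret he hp
  refine (hP H rest frames e ret he hp).trans ?_
  intro v1 hv1
  refine (h1 H rest frames e ret v1 hv1).trans ?_
  intro v2 hv2
  refine (h2 H rest frames e ret v2 hv2).trans ?_
  intro v3 hv3
  rcases hv3 with hopen | hdone
  · obtain ⟨Hc, Fc, ho⟩ := hopen
    refine (h3 H rest frames Hc Fc e ret v3 ho).trans ?_
    intro v4 hv4
    obtain ⟨H', F', hheld⟩ := hv4
    refine (h4 H rest frames H' F' e ret v4 hheld).trans ?_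
    intro v5 hv5
    refine (h5 H rest frames H' F' e ret v5 hv5).trans ?_
    intro v6 hv6
    obtain ⟨H'', hd⟩ := hv6
    exact hE H rest frames H'' e ret v6 hd
  · obtain ⟨Hc, hd⟩ := hdone
    exact hE H rest frames Hc e ret v3 hd

end gif_decode

end Gif.Spec
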